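-- pv_equiv track=rewrite | github.com/FirebirdSolutions/Guardian | prepare_training_data.py | add_tool_call
-- ===== SOURCE A (Python) =====
-- def get_situation_type(risk_level: str) -> str:
--     """Map risk level to situation type for tool calls."""
--     mapping = {
--         'CRITICAL': 'emergency',
--         'HIGH': 'crisis',
--         'MEDIUM': 'support'
--     }
--     return mapping.get(risk_level, 'support')
--
-- def add_tool_call(output: str, risk_level: str) -> str:
--     """Add appropriate tool call if missing."""
--     situation_type = get_situation_type(risk_level)
--     tool_call = f"\n\n[TOOL_CALL: get_crisis_resources(region='NZ', situation_type='{situation_type}')]"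
--
--     # Insert after ACTION line if present
--     if 'ACTION:' in output:
--         lines = output.split('\n')
--         for i, line in enumerate(lines):
--             if line.startswith('ACTION:'):
--                 lines.insert(i + 1, tool_call.strip())
--                 return '\n'.join(lines)
--
--     # Otherwise insert after PATTERNS DETECTED
--     if 'PATTERNS DETECTED:' in output:
--         lines = output.split('\n')
--         for i, line in enumerate(lines):
--             if line.startswith('PATTERNS DETECTED:'):
--                 lines.insert(i + 1, tool_call.strip())
--                 return '\n'.join(lines)
--
--     # Fallback: insert after first line
--     lines = output.split('\n')
--     lines.insert(1, tool_call.strip())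
--     return '\n'.join(lines)
-- ===== SOURCE B (Python) =====
-- def add_tool_call(output: str, risk_level: str) -> str:
--     """Add appropriate tool call if missing (raw-string search and splice, no line list)."""
--     situation_type = {'CRITICAL': 'emergency', 'HIGH': 'crisis',
--                       'MEDIUM': 'support'}.get(risk_level, 'support')
--     tool = f"[TOOL_CALL: get_crisis_resources(region='NZ', situation_type='{situation_type}')]"
--     # pos = start offset of the line to insert after; default: the first line.
--     pos = 0
--     for marker in ('ACTION:', 'PATTERNS DETECTED:'):
--         if output.startswith(marker):
--             pos = 0
--             break
--         k = output.find('\n' + marker)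
--         if k != -1:
--             pos = k + 1
--             break
--     end = output.find('\n', pos)
--     if end == -1:
--         return output + '\n' + tool
--     return output[:end] + '\n' + tool + output[end:]
-- ===== Notes on version B (the rewrite author's own statement) =====
-- stated objective: alternative
-- what changed: B never builds a list of lines: it locates the insertion point directly in the raw string (str.startswith for a marker on the first line, str.find of '\n'+marker for a marker at any later line start, 0 as fallback), finds the end of that line with str.find('\n', pos), and splices the tool string in by slicing, where A splits into lines, loop-scans them per marker, mutates the list with insert and rejoins.
import Mathlib
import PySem

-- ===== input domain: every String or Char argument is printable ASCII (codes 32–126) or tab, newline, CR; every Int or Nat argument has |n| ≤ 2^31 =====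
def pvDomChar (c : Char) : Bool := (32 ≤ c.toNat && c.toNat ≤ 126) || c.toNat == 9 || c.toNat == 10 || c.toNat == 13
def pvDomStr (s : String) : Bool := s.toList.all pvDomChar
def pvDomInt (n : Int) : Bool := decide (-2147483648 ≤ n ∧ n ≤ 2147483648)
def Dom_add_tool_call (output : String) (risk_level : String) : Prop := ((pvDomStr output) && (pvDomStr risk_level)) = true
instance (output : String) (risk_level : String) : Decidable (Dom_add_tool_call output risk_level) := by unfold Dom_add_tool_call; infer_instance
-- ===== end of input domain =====

-- B locates the insertion point directly in the raw string (startswith / find of '\n'+marker /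
-- find of '\n') and splices by slicing, where A splits into a line list, loop-scans it per marker,
-- mutates it with insert and rejoins (objective: alternative; return value only).


-- ===== PORT A =====
def get_situation_type (risk_level : String) : String :=
  let mapping : PySem.Dict String String :=
    PySem.Dict.mk [("CRITICAL", "emergency"), ("HIGH", "crisis"), ("MEDIUM", "support")]
  mapping.getD risk_level "support"

-- A's 'for i, line in enumerate(lines): if line.startswith(m): lines.insert(i+1, t); return …'
-- as a structural recursion: some = the mutated list at the first match, none = loop fell through.
def insertAfterFirstA (pfx tool : String) : List String → Option (List String)
  | [] => none
  | l :: rest =>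
    if PySem.Str.startswith l pfx then some (l :: tool :: rest)
    else (insertAfterFirstA pfx tool rest).map (l :: ·)

def add_tool_call (output : String) (risk_level : String) : String :=
  let situation_type := get_situation_type risk_level
  let tool_call := "\n\n[TOOL_CALL: get_crisis_resources(region='NZ', situation_type='" ++ situation_type ++ "')]"
  let t := PySem.Str.strip tool_call
  let res1 : Option String :=
    if PySem.Str.isIn "ACTION:" output then
      (insertAfterFirstA "ACTION:" t ((PySem.Str.split? output "\n").getD [])).map
        (fun ls => PySem.Str.join "\n" ls)
    else none
  match res1 with
  | some r => r
  | none =>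
    let res2 : Option String :=
      if PySem.Str.isIn "PATTERNS DETECTED:" output then
        (insertAfterFirstA "PATTERNS DETECTED:" t ((PySem.Str.split? output "\n").getD [])).map
          (fun ls => PySem.Str.join "\n" ls)
      else none
    match res2 with
    | some r => r
    | none => PySem.Str.join "\n" (PySem.List.insert ((PySem.Str.split? output "\n").getD []) 1 t)

-- ===== PORT B =====
-- B's 'for marker in (…): if output.startswith(marker): pos = 0; break; k = output.find('\n'+marker); …'
def posLoopB (cs : List Char) : List (List Char) → Nat
  | [] => 0
  | m :: rest =>
    if PySem.Chars.startswith cs m then 0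
    else
      let k := PySem.Chars.find cs ('\n' :: m)
      if k ≠ -1 then (k + 1).toNat else posLoopB cs rest

def add_tool_call_alt (output : String) (risk_level : String) : String :=
  let situation_type :=
    (PySem.Dict.mk [("CRITICAL", "emergency"), ("HIGH", "crisis"), ("MEDIUM", "support")]).getD risk_level "support"
  let tool := "[TOOL_CALL: get_crisis_resources(region='NZ', situation_type='" ++ situation_type ++ "')]"
  let cs := output.toList
  let pos := posLoopB cs ["ACTION:".toList, "PATTERNS DETECTED:".toList]
  let e := PySem.Chars.findFrom cs ['\n'] (pos : Int) none
  -- e is either -1 or a non-negative index, so output[:e] / output[e:] are take/drop — exact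
  if e = -1 then String.ofList (cs ++ '\n' :: tool.toList)
  else String.ofList (cs.take e.toNat ++ '\n' :: tool.toList ++ cs.drop e.toNat)

-- ===== PRECONDITION & SPEC =====
def Spec_add_tool_call (output : String) (risk_level : String) (out : String) : Prop := out = add_tool_call_alt output risk_level
instance (output : String) (risk_level : String) (out : String) : Decidable (Spec_add_tool_call output risk_level out) := by unfold Spec_add_tool_call; infer_instance

-- ===== CLAIM =====
def Claim_equal_add_tool_call : Prop := ∀ (output : String) (risk_level : String), Dom_add_tool_call output risk_level → Spec_add_tool_call output risk_level (add_tool_call output risk_level)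

-- ===== LEMMAS AND PROOFS =====

-- reference split on '\n' (proof-side only)
def splitNL : List Char → List (List Char)
  | [] => [[]]
  | c :: rest =>
    if c = '\n' then [] :: splitNL rest
    else match splitNL rest with
      | [] => [[c]]
      | p :: ps => (c :: p) :: ps

def consHead (pre : List Char) : List (List Char) → List (List Char)
  | [] => [pre]
  | p :: ps => (pre ++ p) :: ps

-- start offset of line j in '\n'.join
def startPos : List (List Char) → Nat → Nat
  | _, 0 => 0
  | [], _ + 1 => 0
  | l :: L, j + 1 => l.length + 1 + startPos L j

lemma splitNL_ne_nil (cs : List Char) : splitNL cs ≠ [] := by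
  cases cs with
  | nil => simp [splitNL]
  | cons c rest =>
    simp only [splitNL]
    split
    · simp
    · cases h : splitNL rest <;> simp

lemma consHead_consHead (pre c : List Char) (X : List (List Char)) (hX : X ≠ []) :
    consHead pre (consHead c X) = consHead (pre ++ c) X := by
  cases X with
  | nil => exact absurd rfl hX
  | cons p ps => simp [consHead]

lemma go_eq (fuel : Nat) : ∀ (l cur : List Char) (acc : List (List Char)), l.length < fuel →
    PySem.Chars.splitOn.go ['\n'] fuel l cur acc = acc.reverse ++ consHead cur.reverse (splitNL l) := by
  induction fuel with
  | zero => intro l cur acc h; omega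
  | succ fuel ih =>
    intro l cur acc h
    cases l with
    | nil =>
      simp [PySem.Chars.splitOn.go, splitNL, consHead]
    | cons c rest =>
      rw [PySem.Chars.splitOn.go]
      by_cases hc : c = '\n'
      · have hp : List.isPrefixOf ['\n'] (c :: rest) = true := by
          simp [List.isPrefixOf, hc]
        rw [if_pos hp]
        have : List.drop (List.length ['\n']) (c :: rest) = rest := by simp
        rw [this, ih rest [] (cur.reverse :: acc) (by simpa using Nat.lt_of_succ_lt_succ h)]
        simp only [splitNL, if_pos hc, consHead, List.reverse_cons, List.reverse_nil,
          List.nil_append, List.append_assoc]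
        cases h2 : splitNL rest with
        | nil => exact absurd h2 (splitNL_ne_nil rest)
        | cons p ps => simp
      · have hp : List.isPrefixOf ['\n'] (c :: rest) = false := by
          simp [List.isPrefixOf]
          exact fun hh => absurd hh.symm hc
        rw [if_neg (by simp [hp])]
        rw [ih rest (c :: cur) acc (by simpa using Nat.lt_of_succ_lt_succ h)]
        congr 1
        have h1 : splitNL (c :: rest) = consHead [c] (splitNL rest) := by
          simp only [splitNL, if_neg hc]
          cases h2 : splitNL rest <;> simp [consHead]
        rw [h1, consHead_consHead _ _ _ (splitNL_ne_nil rest)]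
        simp

lemma splitOn_nl (cs : List Char) : PySem.Chars.splitOn cs ['\n'] = splitNL cs := by
  rw [PySem.Chars.splitOn, go_eq (cs.length + 1) cs [] [] (by omega)]
  simp only [List.reverse_nil, List.nil_append]
  cases h : splitNL cs with
  | nil => exact absurd h (splitNL_ne_nil cs)
  | cons p ps => simp [consHead]

lemma nl_not_mem_splitNL (cs : List Char) : ∀ l ∈ splitNL cs, '\n' ∉ l := by
  induction cs with
  | nil => simp [splitNL]
  | cons c rest ih =>
    simp only [splitNL]
    by_cases hc : c = '\n'
    · rw [if_pos hc]
      intro l hl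
      rcases List.mem_cons.mp hl with h | h
      · simp [h]
      · exact ih l h
    · rw [if_neg hc]
      cases h2 : splitNL rest with
      | nil => exact absurd h2 (splitNL_ne_nil rest)
      | cons p ps =>
        intro l hl
        rcases List.mem_cons.mp hl with h | h
        · subst h
          intro hmem
          rcases List.mem_cons.mp hmem with h' | h'
          · exact hc h'.symm
          · exact ih p (h2 ▸ List.mem_cons_self) h'
        · exact ih l (h2 ▸ List.mem_cons_of_mem p h)

lemma join_cons_ne (l : List Char) (L : List (List Char)) (hL : L ≠ []) :
    PySem.Chars.join ['\n'] (l :: L) = l ++ '\n' :: PySem.Chars.join ['\n'] L := by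
  cases L with
  | nil => exact absurd rfl hL
  | cons q rest => rw [PySem.Chars.join_cons_cons]; simp

lemma join_splitNL (cs : List Char) : PySem.Chars.join ['\n'] (splitNL cs) = cs := by
  induction cs with
  | nil => simp [splitNL, PySem.Chars.join_singleton]
  | cons c rest ih =>
    simp only [splitNL]
    by_cases hc : c = '\n'
    · rw [if_pos hc, join_cons_ne [] _ (splitNL_ne_nil rest), ih, hc]
      simp
    · rw [if_neg hc]
      cases h2 : splitNL rest with
      | nil => exact absurd h2 (splitNL_ne_nil rest)
      | cons p ps =>
        rw [h2] at ih
        cases ps with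
        | nil =>
          rw [PySem.Chars.join_singleton] at ih ⊢
          simp [ih]
        | cons q qs =>
          rw [join_cons_ne _ _ (by simp)] at ih ⊢
          simp [ih]

lemma prefix_append_nl (m l X : List Char) (hm : '\n' ∉ m) :
    m <+: l ++ '\n' :: X ↔ m <+: l := by
  constructor
  · intro h
    by_cases hlen : m.length ≤ l.length
    · have hm2 : m = (l ++ '\n' :: X).take m.length := List.prefix_iff_eq_take.mp h
      rw [List.take_append_of_le_length hlen] at hm2
      rw [hm2]
      exact List.take_prefix _ _
    · exfalso
      apply hm
      have hlt : l.length < m.length := by omega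
      have hget := h.getElem (i := l.length) hlt
      have hnl : m[l.length]'hlt = '\n' := by
        rw [hget, List.getElem_append_right le_rfl]
        simp
      rw [← hnl]
      exact List.getElem_mem hlt
  · intro h
    exact h.trans (List.prefix_append _ _)

lemma prefix_join (m l : List Char) (L : List (List Char)) (hm : '\n' ∉ m) :
    m <+: PySem.Chars.join ['\n'] (l :: L) ↔ m <+: l := by
  cases L with
  | nil => rw [PySem.Chars.join_singleton]
  | cons q rest => rw [join_cons_ne _ _ (by simp)]; exact prefix_append_nl m l _ hm

lemma find_eq_of (s sub : List Char) (q : Nat) (h1 : sub <+: s.drop q)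
    (h2 : ∀ i < q, ¬ sub <+: s.drop i) : PySem.Chars.find s sub = q := by
  have hinf : sub <:+: s := by
    obtain ⟨r, hr⟩ := h1
    exact ⟨s.take q, r, by rw [List.append_assoc, hr]; simp⟩
  have hpos : 0 ≤ PySem.Chars.find s sub := (PySem.Chars.find_nonneg_iff s sub).mpr hinf
  obtain ⟨hocc, hmin⟩ := PySem.Chars.find_spec hpos
  have hge : q ≤ (PySem.Chars.find s sub).toNat := by
    by_contra hlt
    exact h2 _ (by omega) hocc
  have hle : (PySem.Chars.find s sub).toNat ≤ q := by
    by_contra hlt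
    exact hmin q (by omega) h1
  omega

lemma drop_high (l T : List Char) (n : Nat) :
    List.drop (l.length + 1 + n) (l ++ '\n' :: T) = List.drop n T := by
  rw [show l ++ '\n' :: T = (l ++ ['\n']) ++ T by simp, List.drop_append,
    List.drop_eq_nil_of_le (by simp only [List.length_append, List.length_cons, List.length_nil]; omega)]
  simp only [List.nil_append, List.length_append, List.length_cons, List.length_nil]
  congr 1
  omega

lemma no_head_occ (l X m : List Char) (hl : '\n' ∉ l) (i : Nat) (hi : i < l.length) :
    ¬ ('\n' :: m) <+: (l ++ '\n' :: X).drop i := by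
  intro h
  have h1 : List.drop i l = l[i] :: List.drop (i + 1) l := List.drop_eq_getElem_cons hi
  have hdrop : (l ++ '\n' :: X).drop i = l[i] :: (l.drop (i + 1) ++ '\n' :: X) := by
    rw [List.drop_append_of_le_length (by omega), h1, List.cons_append]
  rw [hdrop] at h
  apply hl
  have : l[i] = '\n' := ((List.cons_prefix_cons.mp h).1).symm
  rw [← this]
  exact List.getElem_mem hi

lemma find_shift (l T m : List Char) (hl : '\n' ∉ l) (hT : ¬ m <+: T) :
    PySem.Chars.find (l ++ '\n' :: T) ('\n' :: m)
      = if PySem.Chars.find T ('\n' :: m) = -1 then -1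
        else (l.length : Int) + 1 + PySem.Chars.find T ('\n' :: m) := by
  by_cases hfT : PySem.Chars.find T ('\n' :: m) = -1
  · rw [if_pos hfT]
    rw [PySem.Chars.find_eq_neg_one_iff] at hfT ⊢
    intro hinf
    obtain ⟨j, hj⟩ := (PySem.Chars.exists_prefix_drop_iff_isIn ('\n' :: m) (l ++ '\n' :: T)).mpr
      ((PySem.Chars.isIn_iff_infix _ _).mpr hinf)
    by_cases hjl : j < l.length
    · exact no_head_occ l T m hl j hjl hj
    · by_cases hje : j = l.length
      · subst hje
        rw [List.drop_append_of_le_length le_rfl, List.drop_length, List.nil_append] at hj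
        exact hT (List.cons_prefix_cons.mp hj).2
      · have hj2 : l.length + 1 ≤ j := by omega
        apply hfT
        rw [show j = l.length + 1 + (j - (l.length + 1)) by omega, drop_high] at hj
        exact ((PySem.Chars.isIn_iff_infix _ _).mp
          ((PySem.Chars.exists_prefix_drop_iff_isIn _ _).mp ⟨_, hj⟩))
  · rw [if_neg hfT]
    have hpos : 0 ≤ PySem.Chars.find T ('\n' :: m) := by
      rcases (PySem.Chars.neg_one_le_find T ('\n' :: m)).lt_or_eq with h | h
      · omega
      · exact absurd h.symm hfT
    obtain ⟨hocc, hmin⟩ := PySem.Chars.find_spec hpos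
    set k := (PySem.Chars.find T ('\n' :: m)).toNat with hk
    have hmain : PySem.Chars.find (l ++ '\n' :: T) ('\n' :: m) = ((l.length + 1 + k : Nat) : Int) := by
      apply find_eq_of
      · rw [drop_high]
        exact hocc
      · intro i hi
        by_cases hil : i < l.length
        · exact no_head_occ l T m hl i hil
        · by_cases hie : i = l.length
          · subst hie
            rw [List.drop_append_of_le_length le_rfl, List.drop_length, List.nil_append]
            intro hpre
            exact hT (List.cons_prefix_cons.mp hpre).2
          · intro hpre
            apply hmin (i - (l.length + 1)) (by omega)
            rw [show i = l.length + 1 + (i - (l.length + 1)) by omega, drop_high] at hpre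
            exact hpre
    rw [hmain]
    push_cast
    omega

lemma find_nl_marker (m : List Char) (hm : '\n' ∉ m) :
    ∀ (L : List (List Char)) (l : List Char), '\n' ∉ l → (∀ x ∈ L, '\n' ∉ x) →
    PySem.Chars.find (PySem.Chars.join ['\n'] (l :: L)) ('\n' :: m)
      = (List.findIdx? (fun x => PySem.Chars.startswith x m) L).elim (-1)
          (fun i => (startPos (l :: L) (i + 1) : Int) - 1) := by
  intro L
  induction L with
  | nil =>
    intro l hl _
    simp only [List.findIdx?_nil, Option.elim_none]
    rw [PySem.Chars.join_singleton, PySem.Chars.find_eq_neg_one_iff]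
    intro hinf
    exact hl (hinf.mem List.mem_cons_self)
  | cons l' L' ih =>
    intro l hl hfree
    have hl' : '\n' ∉ l' := hfree l' List.mem_cons_self
    have hfree' : ∀ x ∈ L', '\n' ∉ x := fun x hx => hfree x (List.mem_cons_of_mem _ hx)
    rw [join_cons_ne _ _ (by simp)]
    rw [List.findIdx?_cons]
    by_cases hsw : PySem.Chars.startswith l' m = true
    · rw [if_pos hsw]
      have hml' : m <+: l' := (PySem.Chars.startswith_iff l' m).mp hsw
      have hfound : PySem.Chars.find (l ++ '\n' :: PySem.Chars.join ['\n'] (l' :: L')) ('\n' :: m)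
          = ((l.length : Nat) : Int) := by
        apply find_eq_of
        · rw [List.drop_append_of_le_length le_rfl]
          simp only [List.drop_length, List.nil_append]
          exact List.cons_prefix_cons.mpr ⟨rfl, (prefix_join m l' L' hm).mpr hml'⟩
        · intro i hi
          exact no_head_occ l _ m hl i hi
      rw [hfound]
      simp only [Option.elim_some]
      show ((l.length : Nat) : Int) = ((l.length + 1 + startPos (l' :: L') 0 : Nat) : Int) - 1
      push_cast [startPos]
      ring
    · rw [if_neg hsw]
      have hnm : ¬ m <+: PySem.Chars.join ['\n'] (l' :: L') := by
        rw [prefix_join m l' L' hm]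
        exact fun h => hsw ((PySem.Chars.startswith_iff l' m).mpr h)
      rw [find_shift l _ m hl hnm]
      rw [ih l' hl' hfree']
      cases hidx : List.findIdx? (fun x => PySem.Chars.startswith x m) L' with
      | none => simp
      | some i =>
        simp only [Option.elim_some, Option.map_some]
        have h1 : startPos (l' :: L') (i + 1) = l'.length + 1 + startPos L' i := rfl
        have hsp : (1 : Int) ≤ (startPos (l' :: L') (i + 1) : Int) := by
          rw [h1]; push_cast
          linarith [Int.natCast_nonneg l'.length, Int.natCast_nonneg (startPos L' i)]
        rw [if_neg (by omega)]
        have h2 : ((startPos (l :: l' :: L') (i + 1 + 1) : Nat) : Int)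
            = (l.length : Int) + 1 + (startPos (l' :: L') (i + 1) : Int) := by
          have h3 : startPos (l :: l' :: L') (i + 1 + 1) = l.length + 1 + startPos (l' :: L') (i + 1) := rfl
          rw [h3]; push_cast; ring
        rw [h2]
        ring

lemma find_first_nl (l : List Char) (R : List (List Char)) (hl : '\n' ∉ l) :
    PySem.Chars.find (PySem.Chars.join ['\n'] (l :: R)) ['\n']
      = if R = [] then -1 else (l.length : Int) := by
  cases R with
  | nil =>
    rw [if_pos rfl, PySem.Chars.join_singleton, PySem.Chars.find_eq_neg_one_iff]
    intro hinf
    exact hl (hinf.mem List.mem_cons_self)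
  | cons q rest =>
    rw [if_neg (by simp), join_cons_ne _ _ (by simp)]
    have : PySem.Chars.find (l ++ '\n' :: PySem.Chars.join ['\n'] (q :: rest)) ['\n']
        = (l.length : Nat) := by
      apply find_eq_of
      · rw [List.drop_append_of_le_length le_rfl]
        simp
      · intro i hi
        exact no_head_occ l _ [] hl i hi
    rw [this]

lemma drop_startPos : ∀ (L : List (List Char)) (j : Nat), j < L.length →
    List.drop (startPos L j) (PySem.Chars.join ['\n'] L) = PySem.Chars.join ['\n'] (L.drop j) := by
  intro L
  induction L with
  | nil => intro j h; simp at h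
  | cons l L' ih =>
    intro j hj
    cases j with
    | zero => simp [startPos]
    | succ j' =>
      have hL' : L' ≠ [] := by
        intro h
        rw [h] at hj
        simp at hj
      rw [join_cons_ne _ _ hL']
      show List.drop (l.length + 1 + startPos L' j') _ = _
      rw [drop_high, List.drop_succ_cons]
      exact ih j' (by simpa using hj)

lemma startPos_le : ∀ (L : List (List Char)) (j : Nat), j < L.length →
    startPos L j ≤ (PySem.Chars.join ['\n'] L).length := by
  intro L
  induction L with
  | nil => intro j h; simp at h
  | cons l L' ih =>
    intro j hj
    cases j with
    | zero => simp [startPos]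
    | succ j' =>
      have hL' : L' ≠ [] := by
        intro h; rw [h] at hj; simp at hj
      rw [join_cons_ne _ _ hL']
      show l.length + 1 + startPos L' j' ≤ _
      have h1 := ih j' (by simpa using hj)
      have h2 : (l ++ '\n' :: PySem.Chars.join ['\n'] L').length
          = l.length + 1 + (PySem.Chars.join ['\n'] L').length := by
        simp only [List.length_append, List.length_cons]
        omega
      omega

lemma join_split_at (X Y : List (List Char)) (hX : X ≠ []) (hY : Y ≠ []) :
    PySem.Chars.join ['\n'] (X ++ Y)
      = PySem.Chars.join ['\n'] X ++ '\n' :: PySem.Chars.join ['\n'] Y := by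
  induction X with
  | nil => exact absurd rfl hX
  | cons x X' ih =>
    cases X' with
    | nil =>
      rw [PySem.Chars.join_singleton]
      simpa using join_cons_ne x Y hY
    | cons x' X'' =>
      rw [List.cons_append, join_cons_ne _ _ (by simp), join_cons_ne _ _ (by simp),
        ih (by simp)]
      simp

lemma len_take_join : ∀ (L : List (List Char)) (j : Nat) (hj : j < L.length),
    (PySem.Chars.join ['\n'] (L.take (j + 1))).length = startPos L j + (L[j]'hj).length := by
  intro L
  induction L with
  | nil => intro j h; simp at h
  | cons l L' ih =>
    intro j hj
    cases j with
    | zero => simp [startPos, PySem.Chars.join_singleton]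
    | succ j' =>
      have hj' : j' < L'.length := by simpa using hj
      have htk : L'.take (j' + 1) ≠ [] := by
        intro h
        have h0 := congrArg List.length h
        simp at h0
        subst h0
        simp at hj'
      rw [List.take_succ_cons, join_cons_ne _ _ htk]
      show (l ++ '\n' :: PySem.Chars.join ['\n'] (L'.take (j' + 1))).length
          = l.length + 1 + startPos L' j' + ((l :: L')[j' + 1]'hj).length
      have h1 := ih j' hj'
      simp only [List.length_append, List.length_cons, h1, List.getElem_cons_succ]
      omega

lemma mem_join_infix (l : List Char) (L : List (List Char)) (hl : l ∈ L) :
    l <:+: PySem.Chars.join ['\n'] L := by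
  induction L with
  | nil => simp at hl
  | cons x X ih =>
    rcases List.mem_cons.mp hl with h | h
    · subst h
      cases X with
      | nil => rw [PySem.Chars.join_singleton]
      | cons y Y =>
        rw [join_cons_ne _ _ (by simp)]
        exact (List.prefix_append _ _).isInfix
    · cases X with
      | nil => simp at h
      | cons y Y =>
        rw [join_cons_ne _ _ (by simp)]
        have hsuf : PySem.Chars.join ['\n'] (y :: Y) <:+: x ++ '\n' :: PySem.Chars.join ['\n'] (y :: Y) :=
          ⟨x ++ ['\n'], [], by simp⟩
        exact (ih h).trans hsuf

-- A's loop = insert at (first index)+1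
lemma insertAfterFirstA_eq (pfx tool : String) (ls : List String) :
    insertAfterFirstA pfx tool ls
      = (List.findIdx? (fun l => PySem.Str.startswith l pfx) ls).map
          (fun i => ls.take (i + 1) ++ tool :: ls.drop (i + 1)) := by
  induction ls with
  | nil => rfl
  | cons l rest ih =>
    simp only [insertAfterFirstA, List.findIdx?_cons, ih]
    cases h : PySem.Str.startswith l pfx
    · simp only [Bool.false_eq_true, if_false, Option.map_map]
      rfl
    · simp only [if_true]
      rfl

-- PySem.List.insert at a Nat index ≤ length is take/drop insertion
lemma pyInsert_natCast (xs : List String) (n : Nat) (v : String) (h : n ≤ xs.length) :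
    PySem.List.insert xs (n : Int) v = xs.take n ++ v :: xs.drop n := by
  simp only [PySem.List.insert, PySem.List.sliceIndices]
  norm_num
  rw [if_neg (by omega : ¬ ((n : Int) < 0)), min_eq_left (by exact_mod_cast h)]
  norm_num

-- the situation type is one of three literals
lemma st_mem (risk_level : String) :
    get_situation_type risk_level = "emergency" ∨ get_situation_type risk_level = "crisis" ∨
      get_situation_type risk_level = "support" := by
  unfold get_situation_type
  simp only [PySem.Dict.getD, PySem.Dict.get?, List.find?]
  by_cases h1 : ("CRITICAL" == risk_level) = true
  · simp [h1]
  · simp only [h1]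
    by_cases h2 : ("HIGH" == risk_level) = true
    · simp [h2]
    · simp only [h2]
      by_cases h3 : ("MEDIUM" == risk_level) = true
      · simp [h3]
      · simp [h3]

-- stripping A's tool_call gives B's tool string, for every risk level
lemma strip_tool (risk_level : String) :
    PySem.Str.strip ("\n\n[TOOL_CALL: get_crisis_resources(region='NZ', situation_type='" ++ get_situation_type risk_level ++ "')]")
      = "[TOOL_CALL: get_crisis_resources(region='NZ', situation_type='" ++ get_situation_type risk_level ++ "')]" := by
  rcases st_mem risk_level with h | h | h <;> rw [h] <;> decide

-- B's marker loop, one marker step, when a line matches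
lemma posLoop_cons_some (cs m : List Char) (rest : List (List Char)) (i : Nat)
    (hm : '\n' ∉ m)
    (hidx : List.findIdx? (fun x => PySem.Chars.startswith x m) (splitNL cs) = some i) :
    posLoopB cs (m :: rest) = startPos (splitNL cs) i := by
  cases hL : splitNL cs with
  | nil => exact absurd hL (splitNL_ne_nil cs)
  | cons l T =>
    have hcs : PySem.Chars.join ['\n'] (l :: T) = cs := by rw [← hL]; exact join_splitNL cs
    have hfl : '\n' ∉ l := nl_not_mem_splitNL cs l (hL ▸ List.mem_cons_self)
    have hfT : ∀ x ∈ T, '\n' ∉ x := fun x hx =>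
      nl_not_mem_splitNL cs x (hL ▸ List.mem_cons_of_mem l hx)
    rw [hL, List.findIdx?_cons] at hidx
    have hsw : PySem.Chars.startswith cs m = PySem.Chars.startswith l m := by
      rw [← hcs]
      cases h : PySem.Chars.startswith l m
      · rw [Bool.eq_false_iff]
        intro hc
        rw [PySem.Chars.startswith_iff, prefix_join m l T hm] at hc
        rw [Bool.eq_false_iff] at h
        exact h ((PySem.Chars.startswith_iff l m).mpr hc)
      · rw [PySem.Chars.startswith_iff, prefix_join m l T hm]
        exact (PySem.Chars.startswith_iff l m).mp h
    by_cases h : PySem.Chars.startswith l m = true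
    · rw [if_pos h] at hidx
      have hi : i = 0 := by
        have := Option.some.inj hidx
        omega
      subst hi
      simp only [posLoopB, hsw, if_pos h]
      rfl
    · rw [if_neg h] at hidx
      obtain ⟨i', hi', rfl⟩ : ∃ i', List.findIdx? (fun x => PySem.Chars.startswith x m) T = some i' ∧ i = i' + 1 := by
        cases h2 : List.findIdx? (fun x => PySem.Chars.startswith x m) T with
        | none => rw [h2] at hidx; simp at hidx
        | some v =>
          rw [h2] at hidx
          simp only [Option.map_some] at hidx
          exact ⟨v, rfl, (Option.some.inj hidx).symm⟩
      have hfind : PySem.Chars.find cs ('\n' :: m) = (startPos (l :: T) (i' + 1) : Int) - 1 := by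
        rw [← hcs, find_nl_marker m hm T l hfl hfT, hi']
        rfl
      have hsp : startPos (l :: T) (i' + 1) = l.length + 1 + startPos T i' := rfl
      simp only [posLoopB, hsw]
      rw [if_neg h, hfind]
      have hne : (startPos (l :: T) (i' + 1) : Int) - 1 ≠ -1 := by
        rw [hsp]; push_cast
        intro hc
        have h01 := Int.natCast_nonneg (startPos T i')
        have h02 := Int.natCast_nonneg l.length
        linarith
      rw [if_pos hne]
      have hcast : (startPos (l :: T) (i' + 1) : Int) - 1 + 1 = ((startPos (l :: T) (i' + 1) : Nat) : Int) := by
        ring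
      rw [hcast, Int.toNat_natCast]

-- B's marker loop, one marker step, when no line matches
lemma posLoop_cons_none (cs m : List Char) (rest : List (List Char))
    (hm : '\n' ∉ m)
    (hidx : List.findIdx? (fun x => PySem.Chars.startswith x m) (splitNL cs) = none) :
    posLoopB cs (m :: rest) = posLoopB cs rest := by
  cases hL : splitNL cs with
  | nil => exact absurd hL (splitNL_ne_nil cs)
  | cons l T =>
    have hcs : PySem.Chars.join ['\n'] (l :: T) = cs := by rw [← hL]; exact join_splitNL cs
    have hfl : '\n' ∉ l := nl_not_mem_splitNL cs l (hL ▸ List.mem_cons_self)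
    have hfT : ∀ x ∈ T, '\n' ∉ x := fun x hx =>
      nl_not_mem_splitNL cs x (hL ▸ List.mem_cons_of_mem l hx)
    rw [hL, List.findIdx?_cons] at hidx
    have h : ¬ PySem.Chars.startswith l m = true := by
      intro h
      rw [if_pos h] at hidx
      simp at hidx
    rw [if_neg h] at hidx
    have hT : List.findIdx? (fun x => PySem.Chars.startswith x m) T = none := by
      cases h2 : List.findIdx? (fun x => PySem.Chars.startswith x m) T with
      | none => rfl
      | some v => rw [h2] at hidx; simp at hidx
    have hsw : PySem.Chars.startswith cs m = false := by
      rw [← hcs, Bool.eq_false_iff]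
      intro hc
      rw [PySem.Chars.startswith_iff, prefix_join m l T hm] at hc
      exact h ((PySem.Chars.startswith_iff l m).mpr hc)
    have hfind : PySem.Chars.find cs ('\n' :: m) = -1 := by
      rw [← hcs, find_nl_marker m hm T l hfl hfT, hT]
      rfl
    simp [posLoopB, hsw, hfind]

-- the common tail: find the end of line j and splice = join of the inserted line list
lemma main_splice (cs t : List Char) (j : Nat) (hj : j < (splitNL cs).length) :
    (if PySem.Chars.findFrom cs ['\n'] ((startPos (splitNL cs) j : Nat) : Int) none = -1
     then cs ++ '\n' :: t
     else cs.take (PySem.Chars.findFrom cs ['\n'] ((startPos (splitNL cs) j : Nat) : Int) none).toNat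
            ++ '\n' :: t
            ++ cs.drop (PySem.Chars.findFrom cs ['\n'] ((startPos (splitNL cs) j : Nat) : Int) none).toNat)
    = PySem.Chars.join ['\n'] ((splitNL cs).take (j + 1) ++ t :: (splitNL cs).drop (j + 1)) := by
  have hple : startPos (splitNL cs) j ≤ cs.length := by
    have := startPos_le (splitNL cs) j hj
    rw [join_splitNL cs] at this
    exact this
  have hdrop : List.drop (startPos (splitNL cs) j) cs = PySem.Chars.join ['\n'] ((splitNL cs).drop j) := by
    have := drop_startPos (splitNL cs) j hj
    rw [join_splitNL cs] at this
    exact this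
  have hcons : (splitNL cs).drop j = (splitNL cs)[j] :: (splitNL cs).drop (j + 1) :=
    List.drop_eq_getElem_cons hj
  have hflj : '\n' ∉ (splitNL cs)[j] := nl_not_mem_splitNL cs _ (List.getElem_mem hj)
  rw [PySem.Chars.findFrom_natCast cs ['\n'] (startPos (splitNL cs) j) hple, hdrop, hcons,
    find_first_nl _ _ hflj]
  by_cases hde : (splitNL cs).drop (j + 1) = []
  · have htk : (splitNL cs).take (j + 1) = splitNL cs :=
      List.take_of_length_le (by have := List.drop_eq_nil_iff.mp hde; omega)
    rw [hde]
    simp only [reduceIte]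
    rw [htk, join_split_at (splitNL cs) [t] (splitNL_ne_nil cs) (by simp),
      PySem.Chars.join_singleton, join_splitNL cs]
  · rw [if_neg hde]
    have hlne : ¬ (((splitNL cs)[j].length : Nat) : Int) = -1 :=
      fun hc => absurd (hc ▸ Int.natCast_nonneg ((splitNL cs)[j].length)) (by norm_num)
    rw [if_neg hlne]
    have hcast : (startPos (splitNL cs) j : Int) + ((splitNL cs)[j].length : Int)
        = ((startPos (splitNL cs) j + (splitNL cs)[j].length : Nat) : Int) := by
      push_cast; ring
    have hcond : ¬ ((startPos (splitNL cs) j : Int) + ((splitNL cs)[j].length : Int) = -1) := by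
      rw [hcast]
      exact fun hc => absurd (hc ▸ Int.natCast_nonneg _) (by norm_num)
    rw [if_neg hcond, hcast, Int.toNat_natCast]
    have htkne : (splitNL cs).take (j + 1) ≠ [] := by
      intro h
      have h0 := congrArg List.length h
      rw [List.length_take] at h0
      simp only [List.length_nil] at h0
      omega
    have hsplitcs : cs = PySem.Chars.join ['\n'] ((splitNL cs).take (j + 1))
        ++ '\n' :: PySem.Chars.join ['\n'] ((splitNL cs).drop (j + 1)) := by
      conv_lhs => rw [← join_splitNL cs, ← List.take_append_drop (j + 1) (splitNL cs)]
      rw [join_split_at _ _ htkne hde]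
    have hlen : (PySem.Chars.join ['\n'] ((splitNL cs).take (j + 1))).length
        = startPos (splitNL cs) j + (splitNL cs)[j].length := len_take_join (splitNL cs) j hj
    set eN := startPos (splitNL cs) j + (splitNL cs)[j].length with heN
    rw [join_split_at _ _ htkne (by simp : t :: (splitNL cs).drop (j + 1) ≠ []),
      join_cons_ne _ _ hde]
    have hlen' : (PySem.Chars.join ['\n'] ((splitNL cs).take (j + 1))).length = eN := by
      rw [heN]; exact hlen
    conv_lhs => rw [hsplitcs]
    rw [List.take_left' hlen', List.drop_left' hlen']
    simp

-- bridges between the String-level A side and the List Char level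
lemma split_lines (output : String) :
    (PySem.Str.split? output "\n").getD [] = (splitNL output.toList).map String.ofList := by
  have h1 : PySem.Chars.split? output.toList ['\n'] = some (splitNL output.toList) := by
    rw [PySem.Chars.split?]
    simp [splitOn_nl]
  simp only [PySem.Str.split?]
  rw [show ("\n" : String).toList = ['\n'] from rfl, h1]
  rfl

lemma findIdx_map_bridge (m : String) (L : List (List Char)) :
    List.findIdx? (fun l => PySem.Str.startswith l m) (L.map String.ofList)
      = List.findIdx? (fun x => PySem.Chars.startswith x m.toList) L := by
  rw [List.findIdx?_map]
  congr 1
  funext x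
  simp [PySem.Str.startswith]

lemma join_map_bridge (X : List (List Char)) :
    PySem.Str.join "\n" (X.map String.ofList) = String.ofList (PySem.Chars.join ['\n'] X) := by
  simp only [PySem.Str.join]
  rw [show ("\n" : String).toList = ['\n'] from rfl, List.map_map,
    show String.toList ∘ String.ofList = (id : List Char → List Char) from funext fun x => String.toList_ofList,
    List.map_id]

lemma mixed_list_bridge (X Y : List (List Char)) (s : String) :
    X.map String.ofList ++ s :: Y.map String.ofList = (X ++ s.toList :: Y).map String.ofList := by
  simp [String.ofList_toList]

lemma isIn_of_idx_some (m : String) (output : String) (i : Nat)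
    (h1 : List.findIdx? (fun x => PySem.Chars.startswith x m.toList) (splitNL output.toList) = some i) :
    PySem.Str.isIn m output = true := by
  obtain ⟨hlt, hfi⟩ := List.findIdx?_eq_some_iff_findIdx_eq.mp h1
  have hw : List.findIdx (fun x => PySem.Chars.startswith x m.toList) (splitNL output.toList)
      < (splitNL output.toList).length := by rw [hfi]; exact hlt
  have hg := List.findIdx_getElem (w := hw)
  have hswi : PySem.Chars.startswith ((splitNL output.toList)[i]) m.toList = true := by
    simpa [hfi] using hg
  rw [PySem.Str.isIn_iff_infix]
  have hinf : ((splitNL output.toList)[i]) <:+: output.toList := by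
    have := mem_join_infix _ _ (List.getElem_mem hlt)
    rwa [join_splitNL] at this
  exact (((PySem.Chars.startswith_iff _ _).mp hswi).isInfix).trans hinf

-- one shared step: A inserts after line j at the String level = B's raw splice
lemma common_case (output t : String) (j : Nat) (hj : j < (splitNL output.toList).length) :
    PySem.Str.join "\n"
        (((splitNL output.toList).map String.ofList).take (j + 1)
          ++ t :: ((splitNL output.toList).map String.ofList).drop (j + 1))
      = (if PySem.Chars.findFrom output.toList ['\n'] ((startPos (splitNL output.toList) j : Nat) : Int) none = -1
         then String.ofList (output.toList ++ '\n' :: t.toList)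
         else String.ofList
           (output.toList.take (PySem.Chars.findFrom output.toList ['\n'] ((startPos (splitNL output.toList) j : Nat) : Int) none).toNat
             ++ '\n' :: t.toList
             ++ output.toList.drop (PySem.Chars.findFrom output.toList ['\n'] ((startPos (splitNL output.toList) j : Nat) : Int) none).toNat)) := by
  rw [← apply_ite String.ofList, main_splice output.toList t.toList j hj,
    ← List.map_take, ← List.map_drop, mixed_list_bridge, join_map_bridge]

-- ===== VERDICT =====
theorem add_tool_call_spec : Claim_equal_add_tool_call := by
  intro output risk_level _
  unfold Spec_add_tool_call add_tool_call add_tool_call_alt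
  dsimp only
  rw [strip_tool]
  rw [show (PySem.Dict.mk [("CRITICAL", "emergency"), ("HIGH", "crisis"), ("MEDIUM", "support")]).getD risk_level "support" = get_situation_type risk_level from rfl]
  set t := "[TOOL_CALL: get_crisis_resources(region='NZ', situation_type='" ++ get_situation_type risk_level ++ "')]" with ht
  rw [insertAfterFirstA_eq, insertAfterFirstA_eq, split_lines,
    findIdx_map_bridge "ACTION:", findIdx_map_bridge "PATTERNS DETECTED:"]
  cases h1 : List.findIdx? (fun x => PySem.Chars.startswith x ("ACTION:" : String).toList) (splitNL output.toList) with
  | some i =>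
    have hlt : i < (splitNL output.toList).length :=
      (List.findIdx?_eq_some_iff_findIdx_eq.mp h1).1
    rw [isIn_of_idx_some "ACTION:" output i h1]
    simp only [Option.map_some, reduceIte]
    rw [posLoop_cons_some output.toList _ _ i (by decide) h1]
    exact common_case output t i hlt
  | none =>
    simp only [Option.map_none, ite_self]
    rw [posLoop_cons_none output.toList _ _ (by decide) h1]
    cases h2 : List.findIdx? (fun x => PySem.Chars.startswith x ("PATTERNS DETECTED:" : String).toList) (splitNL output.toList) with
    | some i =>
      have hlt : i < (splitNL output.toList).length :=
        (List.findIdx?_eq_some_iff_findIdx_eq.mp h2).1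
      rw [isIn_of_idx_some "PATTERNS DETECTED:" output i h2]
      simp only [Option.map_some, reduceIte]
      rw [posLoop_cons_some output.toList _ _ i (by decide) h2]
      exact common_case output t i hlt
    | none =>
      simp only [Option.map_none, ite_self]
      rw [posLoop_cons_none output.toList _ _ (by decide) h2]
      have h0lt : 0 < (splitNL output.toList).length := by
        rcases hne : splitNL output.toList with _ | ⟨a, b⟩
        · exact absurd hne (splitNL_ne_nil _)
        · simp
      have hlen1 : 1 ≤ ((splitNL output.toList).map String.ofList).length := by
        rw [List.length_map]; omega
      rw [show (1 : Int) = ((1 : Nat) : Int) from by norm_num,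
        pyInsert_natCast _ 1 t hlen1]
      have hcc := common_case output t 0 h0lt
      simp only [startPos, Nat.zero_add, Nat.cast_zero] at hcc
      simpa [posLoopB] using hcc
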